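-- pv_equiv track=rewrite | github.com/diffeo/kvlayer | kvlayer/_accumulo.py | _string_decrement
-- ===== SOURCE A (Python) =====
-- def _string_decrement(x):
--     if len(x) < 1:
--         return None  # None is before all keys, aka negative infinity
--     pre = x[:-1]
--     post = ord(x[-1])
--     if post > 0:
--         return pre + chr(post - 1) + '\xff'
--     else:
--         pre = _string_decrement(pre)
--         if pre is None:
--             return None
--         return pre + '\xff'
-- ===== SOURCE B (Python) =====
-- def _string_decrement(x):
--     i = len(x) - 1
--     while i >= 0 and x[i] == '\x00':
--         i -= 1
--     if i < 0:
--         return None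
--     return x[:i] + chr(ord(x[i]) - 1) + '\xff' * (len(x) - i)
-- ===== Notes on version B (the rewrite author's own statement) =====
-- stated objective: simpler
-- what changed: Replaces the per-trailing-zero-byte recursion with a single right-to-left scan for the last nonzero character and one closed-form string construction (prefix + decremented char + a run of '\xff').
import Mathlib
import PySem

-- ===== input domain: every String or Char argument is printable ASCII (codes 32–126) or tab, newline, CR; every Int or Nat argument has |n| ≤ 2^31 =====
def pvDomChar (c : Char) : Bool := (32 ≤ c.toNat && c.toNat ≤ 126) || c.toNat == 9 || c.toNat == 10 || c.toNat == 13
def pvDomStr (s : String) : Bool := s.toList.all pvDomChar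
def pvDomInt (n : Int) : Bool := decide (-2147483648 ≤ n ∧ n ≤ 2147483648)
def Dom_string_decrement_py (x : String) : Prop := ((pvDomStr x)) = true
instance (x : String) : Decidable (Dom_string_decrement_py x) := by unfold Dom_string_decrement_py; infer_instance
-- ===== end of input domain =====

-- B replaces A's per-trailing-zero recursion by one right-to-left scan for the last
-- nonzero character plus a closed-form construction (objective: simpler).

-- ===== PORT A =====
-- A recurses on x[:-1]; we transliterate on the reversed character list, where peeling
-- the last character of x is peeling the head of the reversed list.
def pvSdA (rx : List Char) : Option (List Char) :=
  match rx with
  | [] => none                                   -- len(x) < 1: return None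
  | c :: pre =>                                  -- pre = x[:-1] (reversed), post = ord(x[-1])
    if c.toNat > 0 then
      some (pre.reverse ++ [Char.ofNat (c.toNat - 1), Char.ofNat 255])  -- pre + chr(post-1) + '\xff'
    else
      match pvSdA pre with
      | none => none
      | some p => some (p ++ [Char.ofNat 255])   -- pre + '\xff'

def string_decrement_py (x : String) : Option String :=
  (pvSdA x.toList.reverse).map String.mk

-- ===== PORT B =====
-- B's while loop scanning from the right for a non-'\x00' char = dropWhile zero on the
-- reversed list; then the one-shot construction x[:i] + chr(ord(x[i])-1) + '\xff'*(len(x)-i).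
def string_decrement_py_alt (x : String) : Option String :=
  let rx := x.toList.reverse
  match rx.dropWhile (fun c => c.toNat == 0) with
  | [] => none
  | c :: rest =>
      some (String.mk (rest.reverse ++ [Char.ofNat (c.toNat - 1)]
            ++ List.replicate (x.toList.length - rest.length) (Char.ofNat 255)))

-- ===== PRECONDITION & SPEC =====
def Spec_string_decrement_py (x : String) (out : Option String) : Prop := out = string_decrement_py_alt x
instance (x : String) (out : Option String) : Decidable (Spec_string_decrement_py x out) := by unfold Spec_string_decrement_py; infer_instance

-- ===== CLAIM (what is proved, stated in full; the proofs are below) =====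
def Claim_equal_string_decrement_py : Prop := ∀ (x : String), Dom_string_decrement_py x → Spec_string_decrement_py x (string_decrement_py x)

-- ===== LEMMAS AND PROOFS =====
lemma pvSdA_eq_dropWhile (rx : List Char) :
    pvSdA rx =
      match rx.dropWhile (fun c => c.toNat == 0) with
      | [] => none
      | c :: rest =>
          some (rest.reverse ++ [Char.ofNat (c.toNat - 1)]
                ++ List.replicate (rx.length - rest.length) (Char.ofNat 255)) := by
  induction rx with
  | nil => rfl
  | cons c pre ih =>
    by_cases h : c.toNat = 0
    · have hdrop : (c :: pre).dropWhile (fun c => c.toNat == 0)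
          = pre.dropWhile (fun c => c.toNat == 0) := by
        simp [List.dropWhile, h]
      rw [pvSdA, if_neg (by omega), ih, hdrop]
      cases hd : pre.dropWhile (fun c => c.toNat == 0) with
      | nil => rfl
      | cons c' rest' =>
        have hle : rest'.length ≤ pre.length := by
          have := List.length_dropWhile_le (p := fun c => c.toNat == 0) (l := pre)
          rw [hd] at this; simpa using Nat.le_of_succ_le this
        simp only [List.length_cons]
        rw [Nat.succ_sub hle, List.replicate_succ' (n := pre.length - rest'.length)]
        simp
    · have hb : (c.toNat == 0) = false := by simpa using h
      have hdrop : (c :: pre).dropWhile (fun c => c.toNat == 0) = c :: pre := by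
        simp [List.dropWhile, hb]
      rw [pvSdA, if_pos (by omega), hdrop]
      have h1 : pre.length + 1 - pre.length = 1 := by omega
      simp [h1]

-- ===== VERDICT (by name: the statement is the Claim_ definition above) =====
theorem string_decrement_py_spec : Claim_equal_string_decrement_py := by
  intro x _
  unfold Spec_string_decrement_py string_decrement_py string_decrement_py_alt
  rw [pvSdA_eq_dropWhile]
  cases hd : x.toList.reverse.dropWhile (fun c => c.toNat == 0) with
  | nil => simp [hd]
  | cons c rest => simp [hd]
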